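-- pv_equiv track=rewrite | github.com/mohamedbasuony/archai-layout-workspace | backend/app/services/chat_ai.py | _normalize_stream_delta
-- ===== SOURCE A (Python) =====
-- def _normalize_stream_delta(raw_delta: str, current_text: str) -> tuple[str, str]:
--     """Convert cumulative or overlapping stream chunks into append-only deltas."""
--     if not raw_delta:
--         return "", current_text
--
--     if not current_text:
--         return raw_delta, raw_delta
--
--     if raw_delta.startswith(current_text):
--         return raw_delta[len(current_text):], raw_delta
--
--     if current_text.endswith(raw_delta):
--         return "", current_text
--
--     max_overlap = min(len(current_text), len(raw_delta))
--     overlap = 0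
--     for size in range(max_overlap, 0, -1):
--         if current_text.endswith(raw_delta[:size]):
--             overlap = size
--             break
--
--     append_delta = raw_delta[overlap:]
--     return append_delta, current_text + append_delta
-- ===== SOURCE B (Python) =====
-- def _normalize_stream_delta(raw_delta: str, current_text: str) -> tuple[str, str]:
--     """Append-only delta via a KMP automaton: one linear pass instead of
--     testing every candidate overlap length with endswith."""
--     if not raw_delta:
--         return "", current_text
--     if not current_text:
--         return raw_delta, raw_delta
--
--     n = len(raw_delta)
--     # KMP failure function of raw_delta
--     fail = [0]
--     k = 0
--     for ch in raw_delta[1:]: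
--         while k and raw_delta[k] != ch:
--             k = fail[k - 1]
--         if raw_delta[k] == ch:
--             k += 1
--         fail.append(k)
--
--     # state = length of the longest prefix of raw_delta that is a suffix
--     # of the part of current_text processed so far
--     state = 0
--     for ch in current_text:
--         while state and (state == n or raw_delta[state] != ch):
--             state = fail[state - 1]
--         if state < n and raw_delta[state] == ch:
--             state += 1
--
--     append_delta = raw_delta[state:]
--     return append_delta, current_text + append_delta
-- ===== Notes on version B (the rewrite author's own statement) =====
-- stated objective: faster
-- what changed: A tries every candidate overlap length in a descending loop of endswith checks (worst-case quadratic); B builds the KMP failure function of raw_delta and runs its prefix automaton once over current_text, finding the longest suffix-of-current_text that is a prefix of raw_delta in a single linear pass.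
import Mathlib
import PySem

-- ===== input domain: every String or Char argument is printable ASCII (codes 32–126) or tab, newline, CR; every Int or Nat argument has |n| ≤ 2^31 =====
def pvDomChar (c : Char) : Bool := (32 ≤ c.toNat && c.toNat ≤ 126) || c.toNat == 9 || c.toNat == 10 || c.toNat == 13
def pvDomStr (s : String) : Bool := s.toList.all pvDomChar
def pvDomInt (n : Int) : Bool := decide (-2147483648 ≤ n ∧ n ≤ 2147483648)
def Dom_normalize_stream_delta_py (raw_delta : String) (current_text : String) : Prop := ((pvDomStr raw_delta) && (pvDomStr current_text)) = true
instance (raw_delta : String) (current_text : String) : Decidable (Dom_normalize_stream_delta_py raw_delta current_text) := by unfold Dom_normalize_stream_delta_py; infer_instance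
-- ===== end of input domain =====

-- B replaces A's descending endswith scan (quadratic candidate testing) by a single
-- KMP-automaton pass; the timing label for "faster" is whatever the check measured.

-- ===== PORT A =====
-- the `for size in range(max_overlap, 0, -1): if current_text.endswith(raw_delta[:size]): overlap = size; break`
-- loop: first hit wins, 0 if none
def pvAFind (ct rd : List Char) : List Int → Int
  | [] => 0
  | s :: rest =>
    if PySem.Chars.endswith ct (PySem.List.slice rd none (some s)) then s
    else pvAFind ct rd rest

def normalize_stream_delta_py (raw_delta : String) (current_text : String) : String × String :=
  let rd := raw_delta.toList
  let ct := current_text.toList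
  if rd = [] then ("", current_text)
  else if ct = [] then (raw_delta, raw_delta)
  else if PySem.Chars.startswith rd ct then
    (String.ofList (PySem.List.slice rd (some (ct.length : Int)) none), raw_delta)
  else if PySem.Chars.endswith ct rd then ("", current_text)
  else
    let m : Nat := min ct.length rd.length
    let overlap : Int := pvAFind ct rd (PySem.List.pyRange (m : Int) 0 (-1))
    let ad := PySem.List.slice rd (some overlap) none
    (String.ofList ad, String.ofList (ct ++ ad))

-- ===== PORT B =====
-- `while k and raw_delta[k] != ch: k = fail[k-1]`; the fuel (initial k) only makes the
-- recursion total — each iteration strictly decreases k because fail[k-1] ≤ k-1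
def pvFailWhile (rd : List Char) (fl : List Nat) (c : Char) : Nat → Nat → Nat
  | 0, k => k
  | f + 1, k =>
    if k ≠ 0 ∧ rd.getD k ' ' ≠ c then pvFailWhile rd fl c f (fl.getD (k - 1) 0) else k

-- `fail = [0]; k = 0; for ch in raw_delta[1:]: … ; fail.append(k)`
def pvBuildFail (rd : List Char) : List Nat :=
  ((rd.drop 1).foldl (fun (p : List Nat × Nat) c =>
      let k0 := pvFailWhile rd p.1 c p.2 p.2
      let k := if rd.getD k0 ' ' = c then k0 + 1 else k0
      (p.1 ++ [k], k)) ([0], 0)).1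

-- `while state and (state == n or raw_delta[state] != ch): state = fail[state-1]` (fuel as above)
def pvStepWhile (rd : List Char) (fl : List Nat) (c : Char) : Nat → Nat → Nat
  | 0, s => s
  | f + 1, s =>
    if s ≠ 0 ∧ (s = rd.length ∨ rd.getD s ' ' ≠ c) then pvStepWhile rd fl c f (fl.getD (s - 1) 0)
    else s

-- one iteration of `for ch in current_text`
def pvStep (rd : List Char) (fl : List Nat) (s : Nat) (c : Char) : Nat :=
  let s' := pvStepWhile rd fl c s s
  if s' < rd.length ∧ rd.getD s' ' ' = c then s' + 1 else s'

def normalize_stream_delta_py_alt (raw_delta : String) (current_text : String) : String × String :=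
  let rd := raw_delta.toList
  let ct := current_text.toList
  if rd = [] then ("", current_text)
  else if ct = [] then (raw_delta, raw_delta)
  else
    let fl := pvBuildFail rd
    let st := ct.foldl (pvStep rd fl) 0
    let ad := rd.drop st
    (String.ofList ad, String.ofList (ct ++ ad))

-- ===== PRECONDITION & SPEC =====
def Spec_normalize_stream_delta_py (raw_delta : String) (current_text : String) (out : String × String) : Prop := out = normalize_stream_delta_py_alt raw_delta current_text
instance (raw_delta : String) (current_text : String) (out : String × String) : Decidable (Spec_normalize_stream_delta_py raw_delta current_text out) := by unfold Spec_normalize_stream_delta_py; infer_instance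

-- ===== CLAIM (what is proved, stated in full; the proofs are below) =====
def Claim_equal_normalize_stream_delta_py : Prop := ∀ (raw_delta : String) (current_text : String), Dom_normalize_stream_delta_py raw_delta current_text → Spec_normalize_stream_delta_py raw_delta current_text (normalize_stream_delta_py raw_delta current_text)

-- ===== LEMMAS AND PROOFS =====

-- k is an admissible overlap: a prefix of rd of length k that is a suffix of t
def pvCand (rd t : List Char) (k : Nat) : Prop := k ≤ rd.length ∧ rd.take k <:+ t
-- s is THE overlap both programs look for
def pvMaxCand (rd t : List Char) (s : Nat) : Prop := pvCand rd t s ∧ ∀ k, pvCand rd t k → k ≤ s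
-- k is the longest border of rd.take (i+1) (the failure-function value at index i)
def pvMaxBorder (rd : List Char) (i k : Nat) : Prop :=
  (k ≤ i ∧ rd.take k <:+ rd.take (i + 1)) ∧
  ∀ j, j ≤ i → rd.take j <:+ rd.take (i + 1) → j ≤ k
def pvFailGood (rd : List Char) (fl : List Nat) : Prop :=
  ∀ i, i < fl.length → pvMaxBorder rd i (fl.getD i 0)

theorem pvMaxCand_unique {rd t : List Char} {s s' : Nat}
    (h : pvMaxCand rd t s) (h' : pvMaxCand rd t s') : s = s' := by
  exact Nat.le_antisymm (h'.2 _ h.1) (h.2 _ h'.1)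

theorem pvSuffix_snoc {xs ys : List Char} {a b : Char} :
    xs ++ [a] <:+ ys ++ [b] ↔ a = b ∧ xs <:+ ys := by
  rw [List.suffix_concat_iff]
  constructor
  · rintro (h | ⟨t, ht, hsuf⟩)
    · simp at h
    · obtain ⟨h1, h2⟩ := List.append_inj' ht rfl
      simp at h2
      exact ⟨h2, h1 ▸ hsuf⟩
  · rintro ⟨rfl, hsuf⟩
    exact Or.inr ⟨xs, rfl, hsuf⟩

theorem pvTake_snoc {rd : List Char} {k : Nat} (h : k < rd.length) :
    rd.take (k + 1) = rd.take k ++ [rd.getD k ' '] := by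
  rw [List.take_add_one]
  simp [List.getElem?_eq_getElem h]

theorem pvTake_len {l : List Char} {k : Nat} (h : k ≤ l.length) : (l.take k).length = k := by
  simp [List.length_take, Nat.min_eq_left h]

theorem pvSuffix_of_suffix_le {s t u : List Char} (h1 : s <:+ t) (h2 : u <:+ t)
    (hl : u.length ≤ s.length) : u <:+ s := by
  rcases List.suffix_or_suffix_of_suffix h2 h1 with h | h
  · exact h
  · have := List.IsSuffix.length_le h
    have : s.length = u.length := le_antisymm this hl
    exact (List.IsSuffix.eq_of_length h this) ▸ List.suffix_rfl

-- decompose a positive candidate against t ++ [c]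
theorem pvCand_snoc {rd t : List Char} {c : Char} {k : Nat} (hk : 0 < k) (hkn : k ≤ rd.length)
    (h : rd.take k <:+ t ++ [c]) : rd.getD (k - 1) ' ' = c ∧ rd.take (k - 1) <:+ t := by
  have hk1 : k - 1 < rd.length := by omega
  rw [show k = (k - 1) + 1 by omega, pvTake_snoc hk1] at h
  have := pvSuffix_snoc.mp h
  exact ⟨this.1, this.2⟩

theorem pvCand_snoc_rev {rd t : List Char} {c : Char} {k : Nat} (hkn : k < rd.length)
    (hc : rd.getD k ' ' = c) (h : rd.take k <:+ t) : rd.take (k + 1) <:+ t ++ [c] := by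
  rw [pvTake_snoc hkn, hc]
  exact pvSuffix_snoc.mpr ⟨rfl, h⟩

theorem pvFail_le {rd : List Char} {fl : List Nat} (hfg : pvFailGood rd fl) {i : Nat}
    (h : i < fl.length) : fl.getD i 0 ≤ i := (hfg i h).1.1

-- the fail chain dominates every shorter candidate suffix
theorem pvChain {rd : List Char} {fl : List Nat} (hfg : pvFailGood rd fl) {t : List Char}
    {s j : Nat} (hs1 : 1 ≤ s) (hsf : s ≤ fl.length) (hsn : s ≤ rd.length)
    (hs : rd.take s <:+ t) (hj : rd.take j <:+ t) (hjs : j < s) :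
    j ≤ fl.getD (s - 1) 0 ∧ rd.take (fl.getD (s - 1) 0) <:+ t := by
  have hi : s - 1 < fl.length := by omega
  obtain ⟨⟨hfle, hfsuf⟩, hmax⟩ := hfg (s - 1) hi
  rw [show s - 1 + 1 = s by omega] at hfsuf hmax
  have hjt : rd.take j <:+ rd.take s := by
    refine pvSuffix_of_suffix_le hs hj ?_
    rw [pvTake_len hsn, pvTake_len (show j ≤ rd.length by omega)]
    omega
  exact ⟨hmax j (by omega) hjt, hfsuf.trans hs⟩

theorem pvStepWhile_spec {rd : List Char} {fl : List Nat} (hfg : pvFailGood rd fl)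
    (hlen : fl.length = rd.length) {t : List Char} {c : Char} :
    ∀ fuel s, s ≤ fuel → s ≤ rd.length → rd.take s <:+ t →
    (∀ k, pvCand rd (t ++ [c]) k → k ≤ s + 1) →
    (pvStepWhile rd fl c fuel s ≤ rd.length ∧
     rd.take (pvStepWhile rd fl c fuel s) <:+ t ∧
     (∀ k, pvCand rd (t ++ [c]) k → k ≤ pvStepWhile rd fl c fuel s + 1) ∧
     (pvStepWhile rd fl c fuel s = 0 ∨
      (pvStepWhile rd fl c fuel s < rd.length ∧ rd.getD (pvStepWhile rd fl c fuel s) ' ' = c))) := by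
  intro fuel
  induction fuel with
  | zero =>
    intro s hf hsn hs hinv
    have hs0 : s = 0 := by omega
    subst hs0
    simp only [pvStepWhile]
    exact ⟨Nat.zero_le _, by simp, hinv, by simp⟩
  | succ f ih =>
    intro s hf hsn hs hinv
    by_cases hcond : s ≠ 0 ∧ (s = rd.length ∨ rd.getD s ' ' ≠ c)
    · rw [show pvStepWhile rd fl c (f + 1) s = pvStepWhile rd fl c f (fl.getD (s - 1) 0) by
        simp only [pvStepWhile]; rw [if_pos hcond]]
      have hs1 : 1 ≤ s := by omega
      have hsm1 : s - 1 < fl.length := by omega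
      have hfle : fl.getD (s - 1) 0 ≤ s - 1 := pvFail_le hfg hsm1
      have hfsuf : rd.take (fl.getD (s - 1) 0) <:+ t := by
        have h := (hfg (s - 1) hsm1).1.2
        rw [show s - 1 + 1 = s by omega] at h
        exact h.trans hs
      refine ih (fl.getD (s - 1) 0) (by omega) (by omega) hfsuf ?_
      intro k hk
      have hkle := hk.1
      rcases Nat.eq_zero_or_pos k with h0 | hpos
      · omega
      · obtain ⟨hc', hsuf'⟩ := pvCand_snoc hpos hk.1 hk.2
        have hkne : k - 1 ≠ s := by
          intro he
          rcases hcond.2 with hn | hne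
          · omega
          · rw [he] at hc'; exact hne hc'
        have hklt : k - 1 < s := by
          have := hinv k hk
          omega
        have := (pvChain hfg hs1 (by omega) hsn hs hsuf' hklt).1
        omega
    · rw [show pvStepWhile rd fl c (f + 1) s = s by simp only [pvStepWhile]; rw [if_neg hcond]]
      refine ⟨hsn, hs, hinv, ?_⟩
      by_cases hz : s = 0
      · exact Or.inl hz
      · push_neg at hcond
        rcases hcond hz with ⟨hne, hc'⟩
        exact Or.inr ⟨by omega, by simpa using hc'⟩

theorem pvStep_maxcand {rd : List Char} {fl : List Nat} (hfg : pvFailGood rd fl)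
    (hlen : fl.length = rd.length) {t : List Char} {s : Nat} {c : Char}
    (h : pvMaxCand rd t s) : pvMaxCand rd (t ++ [c]) (pvStep rd fl s c) := by
  obtain ⟨⟨hsn, hsuf⟩, hmax⟩ := h
  have hinv : ∀ k, pvCand rd (t ++ [c]) k → k ≤ s + 1 := by
    intro k hk
    have hkle := hk.1
    rcases Nat.eq_zero_or_pos k with h0 | hpos
    · omega
    · obtain ⟨_, hsuf'⟩ := pvCand_snoc hpos hk.1 hk.2
      have := hmax (k - 1) ⟨by omega, hsuf'⟩
      omega
  obtain ⟨ho_le, ho_suf, ho_inv, ho_exit⟩ :=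
    pvStepWhile_spec hfg hlen s s le_rfl hsn hsuf hinv
  unfold pvStep
  by_cases hif : pvStepWhile rd fl c s s < rd.length ∧ rd.getD (pvStepWhile rd fl c s s) ' ' = c
  · rw [if_pos hif]
    exact ⟨⟨by omega, pvCand_snoc_rev hif.1 hif.2 ho_suf⟩, ho_inv⟩
  · rw [if_neg hif]
    have ho0 : pvStepWhile rd fl c s s = 0 := by
      rcases ho_exit with h0 | hx
      · exact h0
      · exact absurd hx hif
    rw [ho0]
    refine ⟨⟨Nat.zero_le _, by simp⟩, ?_⟩
    intro k hk
    have hkle := hk.1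
    have hk1 : k ≤ 1 := by have := ho_inv k hk; omega
    rcases Nat.eq_zero_or_pos k with h0 | hpos
    · omega
    · exfalso
      have hk_eq : k = 1 := by omega
      subst hk_eq
      obtain ⟨hc', _⟩ := pvCand_snoc hpos hk.1 hk.2
      exact hif (ho0 ▸ ⟨by omega, by simpa using hc'⟩)

theorem pvFoldl_maxcand {rd : List Char} {fl : List Nat} (hfg : pvFailGood rd fl)
    (hlen : fl.length = rd.length) :
    ∀ (ts t : List Char) (s : Nat), pvMaxCand rd t s →
      pvMaxCand rd (t ++ ts) (ts.foldl (pvStep rd fl) s) := by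
  intro ts
  induction ts with
  | nil => intro t s h; simpa using h
  | cons c ts ih =>
    intro t s h
    have := ih (t ++ [c]) (pvStep rd fl s c) (pvStep_maxcand hfg hlen h)
    simpa using this

theorem pvMaxCand_nil {rd : List Char} : pvMaxCand rd [] 0 := by
  refine ⟨⟨Nat.zero_le _, by simp⟩, ?_⟩
  intro k hk
  have hlen : (rd.take k).length = k := pvTake_len hk.1
  rw [List.suffix_nil.mp hk.2] at hlen
  simp at hlen
  omega

theorem pvFailWhile_spec {rd : List Char} {fl : List Nat} (hfg : pvFailGood rd fl)
    {j : Nat} (hlen : fl.length = j) (hjn : j < rd.length) (hj1 : 1 ≤ j) {c : Char} :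
    ∀ fuel s, s ≤ fuel → s ≤ j - 1 → rd.take s <:+ rd.take j →
    (∀ m, m ≤ j → rd.take m <:+ rd.take j ++ [c] → m ≤ s + 1) →
    (pvFailWhile rd fl c fuel s ≤ j - 1 ∧
     rd.take (pvFailWhile rd fl c fuel s) <:+ rd.take j ∧
     (∀ m, m ≤ j → rd.take m <:+ rd.take j ++ [c] → m ≤ pvFailWhile rd fl c fuel s + 1) ∧
     (pvFailWhile rd fl c fuel s = 0 ∨ rd.getD (pvFailWhile rd fl c fuel s) ' ' = c)) := by
  intro fuel
  induction fuel with
  | zero =>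
    intro s hf hsj hs hinv
    have hs0 : s = 0 := by omega
    subst hs0
    simp only [pvFailWhile]
    exact ⟨Nat.zero_le _, by simp, hinv, by simp⟩
  | succ f ih =>
    intro s hf hsj hs hinv
    by_cases hcond : s ≠ 0 ∧ rd.getD s ' ' ≠ c
    · rw [show pvFailWhile rd fl c (f + 1) s = pvFailWhile rd fl c f (fl.getD (s - 1) 0) by
        simp only [pvFailWhile]; rw [if_pos hcond]]
      have hs1 : 1 ≤ s := by omega
      have hsm1 : s - 1 < fl.length := by omega
      have hfle : fl.getD (s - 1) 0 ≤ s - 1 := pvFail_le hfg hsm1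
      have hfsuf : rd.take (fl.getD (s - 1) 0) <:+ rd.take j := by
        have h := (hfg (s - 1) hsm1).1.2
        rw [show s - 1 + 1 = s by omega] at h
        exact h.trans hs
      refine ih (fl.getD (s - 1) 0) (by omega) (by omega) hfsuf ?_
      intro m hm hmsuf
      rcases Nat.eq_zero_or_pos m with h0 | hpos
      · omega
      · obtain ⟨hc', hsuf'⟩ := pvCand_snoc hpos (by omega) hmsuf
        have hmne : m - 1 ≠ s := by
          intro he
          rw [he] at hc'; exact hcond.2 hc'
        have hmlt : m - 1 < s := by
          have := hinv m hm hmsuf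
          omega
        have := (pvChain hfg hs1 (by omega) (by omega) hs hsuf' hmlt).1
        omega
    · rw [show pvFailWhile rd fl c (f + 1) s = s by simp only [pvFailWhile]; rw [if_neg hcond]]
      refine ⟨hsj, hs, hinv, ?_⟩
      by_cases hz : s = 0
      · exact Or.inl hz
      · push_neg at hcond
        exact Or.inr (by simpa using hcond hz)

theorem pvBuildFail_aux {rd : List Char} :
    ∀ cnt j fl k, j + cnt = rd.length → 1 ≤ j → fl.length = j → pvFailGood rd fl →
      k = fl.getD (j - 1) 0 →
      (((rd.drop j).foldl (fun (p : List Nat × Nat) c =>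
          let k0 := pvFailWhile rd p.1 c p.2 p.2
          let k := if rd.getD k0 ' ' = c then k0 + 1 else k0
          (p.1 ++ [k], k)) (fl, k)).1.length = rd.length ∧
       pvFailGood rd ((rd.drop j).foldl (fun (p : List Nat × Nat) c =>
          let k0 := pvFailWhile rd p.1 c p.2 p.2
          let k := if rd.getD k0 ' ' = c then k0 + 1 else k0
          (p.1 ++ [k], k)) (fl, k)).1) := by
  intro cnt
  induction cnt with
  | zero =>
    intro j fl k hsum hj1 hlen hfg hk
    rw [List.drop_of_length_le (by omega)]
    simp only [List.foldl_nil]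
    exact ⟨by omega, hfg⟩
  | succ cnt ih =>
    intro j fl k hsum hj1 hlen hfg hk
    have hjn : j < rd.length := by omega
    rw [List.drop_eq_getElem_cons hjn, List.foldl_cons]
    have hc : (rd[j] : Char) = rd.getD j ' ' := (List.getD_eq_getElem rd ' ' hjn).symm
    rw [hc]
    obtain ⟨⟨hk_le, hk_suf⟩, hk_max⟩ :
        pvMaxBorder rd (j - 1) k := hk ▸ hfg (j - 1) (by omega)
    rw [show j - 1 + 1 = j by omega] at hk_suf hk_max
    have hinv : ∀ m, m ≤ j → rd.take m <:+ rd.take j ++ [rd.getD j ' '] → m ≤ k + 1 := by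
      intro m hm hmsuf
      rcases Nat.eq_zero_or_pos m with h0 | hpos
      · omega
      · obtain ⟨_, hsuf'⟩ := pvCand_snoc hpos (by omega) hmsuf
        have := hk_max (m - 1) (by omega) hsuf'
        omega
    obtain ⟨ho_le, ho_suf, ho_inv, ho_exit⟩ :=
      pvFailWhile_spec hfg hlen hjn hj1 k k le_rfl hk_le hk_suf hinv
    have htake : rd.take (j + 1) = rd.take j ++ [rd.getD j ' '] := pvTake_snoc hjn
    set o := pvFailWhile rd fl (rd.getD j ' ') k k with ho_def
    set k' := if rd.getD o ' ' = rd.getD j ' ' then o + 1 else o with hk'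
    have hMB : pvMaxBorder rd j k' := by
      by_cases hifc : rd.getD o ' ' = rd.getD j ' '
      · rw [hk', if_pos hifc]
        constructor
        · refine ⟨by omega, ?_⟩
          rw [htake]
          exact pvCand_snoc_rev (by omega) hifc ho_suf
        · intro m hm hmsuf
          rw [htake] at hmsuf
          have := ho_inv m hm hmsuf
          omega
      · rw [hk', if_neg hifc]
        have ho0 : o = 0 := by
          rcases ho_exit with h0 | hx
          · exact h0
          · exact absurd hx hifc
        constructor
        · rw [ho0]; exact ⟨Nat.zero_le _, by simp⟩
        · intro m hm hmsuf
          rw [htake] at hmsuf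
          have hm1 : m ≤ 1 := by have := ho_inv m hm hmsuf; omega
          rcases Nat.eq_zero_or_pos m with h0 | hpos
          · omega
          · exfalso
            have hm_eq : m = 1 := by omega
            subst hm_eq
            obtain ⟨hc', _⟩ := pvCand_snoc hpos (by omega) hmsuf
            simp only [Nat.sub_self] at hc'
            exact hifc (by rw [ho0]; exact hc')
    have hfg' : pvFailGood rd (fl ++ [k']) := by
      intro i hi
      simp only [List.length_append, List.length_cons, List.length_nil] at hi
      by_cases hij : i < j
      · have hgd : (fl ++ [k']).getD i 0 = fl.getD i 0 := by
          rw [List.getD_eq_getElem _ _ (by simp; omega), List.getD_eq_getElem _ _ (by omega),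
            List.getElem_append_left (by omega)]
        rw [hgd]
        exact hfg i (by omega)
      · have hij' : i = j := by omega
        subst hij'
        have hgd : (fl ++ [k']).getD i 0 = k' := by
          rw [List.getD_eq_getElem _ _ (by simp; omega)]
          rw [List.getElem_append_right (by omega)]
          simp [hlen]
        rw [hgd]
        exact hMB
    have hlast : (fl ++ [k']).getD (j + 1 - 1) 0 = k' := by
      rw [List.getD_eq_getElem _ _ (by simp; omega)]
      rw [List.getElem_append_right (by omega)]
      simp [hlen]
    have := ih (j + 1) (fl ++ [k']) k' (by omega) (by omega) (by simp [hlen]) hfg' hlast.symm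
    simpa using this

theorem pvBuildFail_good {rd : List Char} (hrd : rd ≠ []) :
    (pvBuildFail rd).length = rd.length ∧ pvFailGood rd (pvBuildFail rd) := by
  have hn : 1 ≤ rd.length := by
    have := List.length_pos_iff.mpr hrd; omega
  have hfg0 : pvFailGood rd [0] := by
    intro i hi
    have : i = 0 := by simpa using hi
    subst this
    exact ⟨⟨le_refl 0, by simp⟩, fun m hm _ => hm⟩
  have := pvBuildFail_aux (rd := rd) (rd.length - 1) 1 [0] 0 (by omega) le_rfl rfl hfg0 rfl
  exact this

theorem pvMaxCand_le_min {rd ct : List Char} {s : Nat} (h : pvMaxCand rd ct s) :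
    s ≤ min ct.length rd.length := by
  have h1 := h.1.1
  have h2 := List.IsSuffix.length_le h.1.2
  rw [pvTake_len h1] at h2
  omega

theorem pvAFind_spec {rd ct : List Char} {s : Nat} (h : pvMaxCand rd ct s) :
    ∀ j : Nat, s ≤ j → j ≤ rd.length →
      pvAFind ct rd (PySem.List.pyRange (j : Int) 0 (-1)) = (s : Int) := by
  intro j
  induction j with
  | zero =>
    intro hsj _
    rw [PySem.List.pyRange_neg_one_eq_nil (by norm_num)]
    simp [pvAFind]
    omega
  | succ j ih =>
    intro hsj hjn
    rw [show ((j + 1 : Nat) : Int) = (j : Int) + 1 by push_cast; ring]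
    rw [PySem.List.pyRange_neg_one_cons (by positivity)]
    rw [show (j : Int) + 1 - 1 = (j : Int) by ring]
    by_cases hend : PySem.Chars.endswith ct (PySem.List.slice rd none (some ((j : Int) + 1)))
    · rw [show pvAFind ct rd (((j : Int) + 1) :: PySem.List.pyRange (j : Int) 0 (-1)) = (j : Int) + 1 by
        simp [pvAFind, hend]]
      have hsuf : rd.take (j + 1) <:+ ct := by
        have := (PySem.Chars.endswith_iff _ _).mp hend
        rwa [show ((j : Int) + 1) = ((j + 1 : Nat) : Int) by push_cast; ring,
          PySem.List.slice_to_natCast] at this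
      have : j + 1 ≤ s := h.2 (j + 1) ⟨hjn, hsuf⟩
      have hse : s = j + 1 := by omega
      rw [hse]; push_cast; ring
    · rw [show pvAFind ct rd (((j : Int) + 1) :: PySem.List.pyRange (j : Int) 0 (-1)) =
          pvAFind ct rd (PySem.List.pyRange (j : Int) 0 (-1)) by
        simp [pvAFind, hend]]
      have hsne : s ≠ j + 1 := by
        intro he
        apply hend
        rw [show ((j : Int) + 1) = ((j + 1 : Nat) : Int) by push_cast; ring,
          PySem.List.slice_to_natCast]
        exact (PySem.Chars.endswith_iff _ _).mpr (he ▸ h.1.2)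
      exact ih (by omega) (by omega)

theorem pvAlt_eq {raw ct : String} (hrd : raw.toList ≠ []) (hct : ct.toList ≠ []) :
    ∃ s : Nat, pvMaxCand raw.toList ct.toList s ∧
      normalize_stream_delta_py_alt raw ct =
        (String.ofList (raw.toList.drop s), String.ofList (ct.toList ++ raw.toList.drop s)) := by
  obtain ⟨hlen, hfg⟩ := pvBuildFail_good hrd
  refine ⟨ct.toList.foldl (pvStep raw.toList (pvBuildFail raw.toList)) 0, ?_, ?_⟩
  · simpa using pvFoldl_maxcand hfg hlen ct.toList [] 0 pvMaxCand_nil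
  · unfold normalize_stream_delta_py_alt
    rw [if_neg hrd, if_neg hct]

theorem pvMaxCand_startswith {rd ct : List Char} (hpre : ct <+: rd) :
    pvMaxCand rd ct ct.length := by
  have heq : ct = rd.take ct.length := List.prefix_iff_eq_take.mp hpre
  refine ⟨⟨hpre.length_le, ?_⟩, ?_⟩
  · rw [← heq]
  · intro k hk
    have h2 := hk.2.length_le
    rw [pvTake_len hk.1] at h2
    exact h2

theorem pvMaxCand_endswith {rd ct : List Char} (hsuf : rd <:+ ct) :
    pvMaxCand rd ct rd.length := by
  refine ⟨⟨le_rfl, ?_⟩, fun k hk => hk.1⟩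
  simpa [List.take_length] using hsuf

-- ===== VERDICT (by name: the statement is the Claim_ definition above) =====
theorem normalize_stream_delta_py_spec : Claim_equal_normalize_stream_delta_py := by
  intro raw ct _
  unfold Spec_normalize_stream_delta_py
  by_cases h1 : raw.toList = []
  · unfold normalize_stream_delta_py normalize_stream_delta_py_alt
    simp [h1]
  by_cases h2 : ct.toList = []
  · unfold normalize_stream_delta_py normalize_stream_delta_py_alt
    simp [h1, h2]
  obtain ⟨s, hmax, halt⟩ := pvAlt_eq h1 h2
  rw [halt]
  unfold normalize_stream_delta_py
  rw [if_neg h1, if_neg h2]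
  by_cases h3 : PySem.Chars.startswith raw.toList ct.toList
  · rw [if_pos h3]
    have hpre : ct.toList <+: raw.toList := (PySem.Chars.startswith_iff _ _).mp h3
    have hse : s = ct.toList.length := pvMaxCand_unique hmax (pvMaxCand_startswith hpre)
    obtain ⟨u, hu⟩ := hpre
    have hdrop : raw.toList.drop ct.toList.length = u := by
      rw [← hu, List.drop_left]
    rw [PySem.List.slice_from_natCast, hse, hdrop, hu, String.ofList_toList]
  by_cases h4 : PySem.Chars.endswith ct.toList raw.toList
  · rw [if_neg h3, if_pos h4]
    have hsuf : raw.toList <:+ ct.toList := (PySem.Chars.endswith_iff _ _).mp h4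
    have hse : s = raw.toList.length := pvMaxCand_unique hmax (pvMaxCand_endswith hsuf)
    rw [hse, List.drop_length, List.append_nil, String.ofList_toList]
  · rw [if_neg h3, if_neg h4]
    have hfind := pvAFind_spec hmax (min ct.toList.length raw.toList.length)
      (pvMaxCand_le_min hmax) (min_le_right _ _)
    simp only [hfind, PySem.List.slice_from_natCast]
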